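-- pv_equiv track=rewrite | github.com/noir1458/numpy_pandas | fit_hw1.py | homework1_2
-- ===== SOURCE A (Python) =====
-- def homework1_2(text):
--     freq_dict = {}
--     for char in text:
--         if char in freq_dict:
--             freq_dict[char] += 1
--         else:
--             freq_dict[char] = 1
--     max_char = ''
--     max_freq = 0
--     for char, freq in freq_dict.items():
--         if freq > max_freq:
--             max_char = char
--             max_freq = freq
--     sen = text.replace(max_char, str(max_freq))
--
--     return sen
-- ===== SOURCE B (Python) =====
-- def homework1_2(text):
--     # sort the characters: equal characters become contiguous runs
--     s = sorted(text)
--     # run-length encode the sorted list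
--     runs = []
--     while s:
--         c = s[0]
--         k = 1
--         while k < len(s) and s[k] == c:
--             k += 1
--         runs.append((c, k))
--         s = s[k:]
--     # the largest run length is the maximal frequency
--     best_freq = 0
--     for _, cnt in runs:
--         if cnt > best_freq:
--             best_freq = cnt
--     # first character of the text whose run has that length
--     best_char = ''
--     for ch in text:
--         if (ch, best_freq) in runs:
--             best_char = ch
--             break
--     return text.replace(best_char, str(best_freq))
-- ===== Notes on version B (the rewrite author's own statement) =====
-- stated objective: alternative
-- what changed: B drops A's frequency dictionary entirely: it sorts the characters, run-length-encodes the sorted list, takes the longest run as the frequency, and scans the text for the first character that heads such a run.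
import Mathlib
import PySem

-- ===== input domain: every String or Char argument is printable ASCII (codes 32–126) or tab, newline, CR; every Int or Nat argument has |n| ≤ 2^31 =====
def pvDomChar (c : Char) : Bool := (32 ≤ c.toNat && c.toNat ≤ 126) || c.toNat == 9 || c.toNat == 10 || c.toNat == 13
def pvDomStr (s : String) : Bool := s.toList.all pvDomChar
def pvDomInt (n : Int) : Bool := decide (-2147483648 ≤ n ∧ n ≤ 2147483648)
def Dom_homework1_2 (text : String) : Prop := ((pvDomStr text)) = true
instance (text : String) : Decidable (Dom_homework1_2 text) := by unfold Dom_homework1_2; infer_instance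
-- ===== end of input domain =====

-- B replaces A's frequency dictionary by sort + run-length encoding: the longest run of the
-- sorted characters is the maximal frequency and the replaced character is the first character
-- of the text heading a run of that length (objective: alternative algorithm, no dict).

-- ===== PORT A =====
def homework1_2 (text : String) : String :=
  let d : PySem.Dict Char Int := text.toList.foldl
    (fun d c => if d.contains c then d.insert c (d.getD c 0 + 1) else d.insert c 1)
    PySem.Dict.empty
  let m : String × Int := d.items.foldl
    (fun (p : String × Int) kv => if kv.2 > p.2 then (String.ofList [kv.1], kv.2) else p)
    ("", 0)
  PySem.Str.replace text m.1 (PySem.Int.toStr m.2)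

-- ===== PORT B =====
-- the two while-loops of Source B: peel the leading run of the sorted list (the inner
-- 'while s[k] == c' is the takeWhile, the slice s[k:] the dropWhile) and recurse on the rest
def pvRuns (s : List Char) : List (Char × Int) :=
  match s with
  | [] => []
  | c :: t => (c, (1 + (t.takeWhile (· == c)).length : Int)) :: pvRuns (t.dropWhile (· == c))
termination_by s.length
decreasing_by
  simp only [List.length_cons]
  exact Nat.lt_succ_of_le (List.length_dropWhile_le _ _)

def homework1_2_alt (text : String) : String :=
  let s : List Char := PySem.List.sorted text.toList (fun c => c) false
  let runs : List (Char × Int) := pvRuns s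
  let bestFreq : Int := runs.foldl (fun m p => if p.2 > m then p.2 else m) 0
  -- 'for ch in text: if (ch, best_freq) in runs: best_char = ch; break'
  let bestChar : String := match text.toList.find? (fun ch => runs.contains (ch, bestFreq)) with
    | some ch => String.ofList [ch]
    | none => ""
  PySem.Str.replace text bestChar (PySem.Int.toStr bestFreq)

-- ===== PRECONDITION & SPEC =====
def Spec_homework1_2 (text : String) (out : String) : Prop := out = homework1_2_alt text
instance (text : String) (out : String) : Decidable (Spec_homework1_2 text out) := by unfold Spec_homework1_2; infer_instance

-- ===== CLAIM (what is proved, stated in full; the proofs are below) =====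
def Claim_equal_homework1_2 : Prop := ∀ (text : String), Dom_homework1_2 text → Spec_homework1_2 text (homework1_2 text)

-- ===== LEMMAS AND PROOFS =====

-- a key not in the dict reads as the default
lemma getD_zero_of_not_contains (d : PySem.Dict Char Int) (c : Char)
    (h : d.contains c = false) : d.getD c 0 = 0 := by
  simp only [PySem.Dict.getD, PySem.Dict.get?]
  simp only [PySem.Dict.contains, List.any_eq_false] at h
  rw [List.find?_eq_none.mpr (fun p hp => by simpa using h p hp)]
  rfl

-- A's guarded counting loop is exactly PySem's counter
lemma dictA_eq_counter (xs : List Char) :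
    xs.foldl (fun d c => if d.contains c then d.insert c (d.getD c 0 + 1) else d.insert c 1)
      (PySem.Dict.empty : PySem.Dict Char Int) = PySem.Dict.counter xs := by
  unfold PySem.Dict.counter
  congr 1
  funext d c
  by_cases h : d.contains c
  · simp [h, PySem.Dict.modify]
  · simp only [Bool.not_eq_true] at h
    simp [h, PySem.Dict.modify, getD_zero_of_not_contains d c h]

-- characterisation of A's selection loop: the running max, paired with the FIRST key attaining it
lemma foldl_sel_eq (t : List (Char × Int)) (p : String × Int) :
    t.foldl (fun (p : String × Int) kv => if kv.2 > p.2 then (String.ofList [kv.1], kv.2) else p) p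
      = if (t.map Prod.snd).foldl max p.2 = p.2 then p
        else match t.find? (fun kv => kv.2 == (t.map Prod.snd).foldl max p.2) with
          | some kv => (String.ofList [kv.1], (t.map Prod.snd).foldl max p.2)
          | none => p := by
  induction t generalizing p with
  | nil => simp
  | cons kv t ih =>
    simp only [List.foldl_cons, List.map_cons]
    by_cases h : kv.2 > p.2
    · rw [if_pos h, ih]
      have hmax : max p.2 kv.2 = kv.2 := by omega
      rw [hmax]
      have hle := (PySem.List.le_foldl_max (t.map Prod.snd) kv.2).1
      by_cases hM : (t.map Prod.snd).foldl max kv.2 = kv.2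
      · rw [if_pos hM, if_neg (by omega), List.find?_cons_of_pos (by simp [hM])]
        simp [hM]
      · rw [if_neg (by simp [hM]), if_neg (by omega), List.find?_cons_of_neg (by simp; omega)]
        rcases PySem.List.foldl_max_mem (t.map Prod.snd) kv.2 with h1 | h1
        · exact absurd h1 hM
        · rcases List.mem_map.mp h1 with ⟨kv2, hmem, hsnd⟩
          have hsome : (List.find? (fun kv3 => kv3.2 == (t.map Prod.snd).foldl max kv.2) t).isSome := by
            rw [List.find?_isSome]; exact ⟨kv2, hmem, by simp [hsnd]⟩
          obtain ⟨kv3, hfind⟩ := Option.isSome_iff_exists.mp hsome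
          rw [hfind]
    · rw [if_neg h, ih]
      have hmax : max p.2 kv.2 = p.2 := by omega
      rw [hmax]
      have hle := (PySem.List.le_foldl_max (t.map Prod.snd) p.2).1
      by_cases hM : (t.map Prod.snd).foldl max p.2 = p.2
      · rw [if_pos hM, if_pos hM]
      · rw [if_neg hM, if_neg hM, List.find?_cons_of_neg (by simp; omega)]

-- B's max loop is the same running maximum
lemma foldl_best_eq (t : List (Char × Int)) (m : Int) :
    t.foldl (fun m (p : Char × Int) => if p.2 > m then p.2 else m) m = (t.map Prod.snd).foldl max m := by
  induction t generalizing m with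
  | nil => rfl
  | cons kv t ih =>
    simp only [List.foldl_cons, List.map_cons, ih]
    congr 1
    by_cases h : kv.2 > m <;> simp [h] <;> omega

-- find? respects a predicate that agrees on the members of the list
lemma find?_congr_mem {α : Type} (p q : α → Bool) :
    ∀ l : List α, (∀ a ∈ l, p a = q a) → l.find? p = l.find? q := by
  intro l
  induction l with
  | nil => intro _; rfl
  | cons x l ih =>
    intro h
    by_cases hx : p x
    · rw [List.find?_cons_of_pos hx, List.find?_cons_of_pos (by rw [← h x List.mem_cons_self]; exact hx)]
    · rw [List.find?_cons_of_neg hx, List.find?_cons_of_neg (by rw [← h x List.mem_cons_self]; exact hx),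
        ih (fun a ha => h a (List.mem_cons_of_mem _ ha))]

lemma not_mem_dropWhile_of_sorted {c : Char} {t : List Char}
    (hs : (c :: t).Pairwise (· ≤ ·)) : c ∉ t.dropWhile (· == c) := by
  intro hmem
  have hsub : (t.dropWhile (· == c)).Sublist t := List.dropWhile_sublist _
  have hpt : t.Pairwise (· ≤ ·) := (List.pairwise_cons.mp hs).2
  have hpd : (t.dropWhile (· == c)).Pairwise (· ≤ ·) := hpt.sublist hsub
  cases hd : t.dropWhile (· == c) with
  | nil => rw [hd] at hmem; exact absurd hmem (List.not_mem_nil)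
  | cons d0 dt =>
    have hne : (d0 == c) = false := by
      have := List.head?_dropWhile_not (· == c) t
      rw [hd] at this; exact this
    have hd0 : d0 ∈ t := hsub.mem (by rw [hd]; exact List.mem_cons_self)
    have hcle : c ≤ d0 := (List.pairwise_cons.mp hs).1 d0 hd0
    have hlt : c < d0 := lt_of_le_of_ne hcle (fun he => by simp [← he] at hne)
    rw [hd] at hmem hpd
    rcases List.mem_cons.mp hmem with h | h
    · exact absurd h.symm (ne_of_gt hlt)
    · exact absurd ((List.pairwise_cons.mp hpd).1 c h) (not_le.mpr hlt)

lemma pvRuns_keys_mem (s : List Char) (c : Char) :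
    c ∈ (pvRuns s).map Prod.fst ↔ c ∈ s := by
  induction s using pvRuns.induct with
  | case1 => simp [pvRuns]
  | case2 c0 t ih =>
    have hsplit : t.takeWhile (· == c0) ++ t.dropWhile (· == c0) = t := List.takeWhile_append_dropWhile
    rw [pvRuns]
    simp only [List.map_cons, List.mem_cons, ih]
    constructor
    · rintro (rfl | h)
      · exact Or.inl rfl
      · exact Or.inr (hsplit ▸ List.mem_append_right _ h)
    · rintro (rfl | h)
      · exact Or.inl rfl
      · rw [← hsplit] at h
        rcases List.mem_append.mp h with h | h
        · exact Or.inl (by simpa using List.mem_takeWhile_imp h)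
        · exact Or.inr h

lemma pvRuns_mem {s : List Char} (hs : s.Pairwise (· ≤ ·)) :
    ∀ kv ∈ pvRuns s, kv.1 ∈ s ∧ kv.2 = (s.count kv.1 : Int) := by
  induction s using pvRuns.induct with
  | case1 => simp [pvRuns]
  | case2 c0 t ih =>
    intro kv hkv
    have hsplit : t.takeWhile (· == c0) ++ t.dropWhile (· == c0) = t := List.takeWhile_append_dropWhile
    have hnotin : c0 ∉ t.dropWhile (· == c0) := not_mem_dropWhile_of_sorted hs
    have hpd : (t.dropWhile (· == c0)).Pairwise (· ≤ ·) :=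
      ((List.pairwise_cons.mp hs).2).sublist (List.dropWhile_sublist _)
    rw [pvRuns] at hkv
    have hcount : (t.takeWhile (· == c0)).count c0 = (t.takeWhile (· == c0)).length := by
      apply List.count_eq_length.mpr
      intro a ha
      have hb : (a == c0) = true := List.mem_takeWhile_imp (p := (· == c0)) ha
      exact (eq_of_beq hb).symm
    rcases List.mem_cons.mp hkv with rfl | h
    · refine ⟨List.mem_cons_self, ?_⟩
      have ht : t.count c0 = (t.takeWhile (· == c0)).count c0 + (t.dropWhile (· == c0)).count c0 := by
        conv_lhs => rw [← hsplit]
        exact List.count_append ..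
      rw [List.count_cons_self, ht, hcount, List.count_eq_zero.mpr hnotin]
      push_cast; ring
    · obtain ⟨h1, h2⟩ := ih hpd kv h
      have hne : kv.1 ≠ c0 := fun he => hnotin (he ▸ h1)
      refine ⟨List.mem_cons_of_mem _ (hsplit ▸ List.mem_append_right _ h1), ?_⟩
      rw [h2]
      congr 1
      have ht : t.count kv.1 = (t.takeWhile (· == c0)).count kv.1 + (t.dropWhile (· == c0)).count kv.1 := by
        conv_lhs => rw [← hsplit]
        exact List.count_append ..
      have h0 : List.count kv.1 (t.takeWhile (· == c0)) = 0 :=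
        List.count_eq_zero.mpr (fun hmem => hne (eq_of_beq (List.mem_takeWhile_imp (p := (· == c0)) hmem)))
      rw [List.count_cons_of_ne hne.symm, ht, h0]
      omega

lemma pvRuns_keys_nodup {s : List Char} (hs : s.Pairwise (· ≤ ·)) :
    ((pvRuns s).map Prod.fst).Nodup := by
  induction s using pvRuns.induct with
  | case1 => simp [pvRuns]
  | case2 c0 t ih =>
    have hnotin : c0 ∉ t.dropWhile (· == c0) := not_mem_dropWhile_of_sorted hs
    have hpd : (t.dropWhile (· == c0)).Pairwise (· ≤ ·) :=
      ((List.pairwise_cons.mp hs).2).sublist (List.dropWhile_sublist _)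
    rw [pvRuns]
    simp only [List.map_cons, List.nodup_cons]
    exact ⟨fun h => hnotin ((pvRuns_keys_mem _ _).mp h), ih hpd⟩

lemma pvRuns_pair_mem {s : List Char} (hs : s.Pairwise (· ≤ ·)) (c : Char) (k : Int) :
    ((c, k) ∈ pvRuns s) ↔ (c ∈ s ∧ k = (s.count c : Int)) := by
  constructor
  · intro h; exact pvRuns_mem hs _ h
  · rintro ⟨h1, rfl⟩
    have := (pvRuns_keys_mem s c).mpr h1
    rcases List.mem_map.mp this with ⟨kv, hmem, hfst⟩
    obtain ⟨_, h2⟩ := pvRuns_mem hs kv hmem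
    have : kv = (c, (s.count c : Int)) := by
      cases kv; simp_all
    exact this ▸ hmem

lemma find?_foldl_add (p : Char → Bool) : ∀ (xs acc : List Char),
    List.find? p (xs.foldl PySem.Set.add acc)
      = (List.find? p acc).or (List.find? (fun a => p a && !acc.contains a) xs) := by
  intro xs
  induction xs with
  | nil => intro acc; simp
  | cons x xs ih =>
    intro acc
    simp only [List.foldl_cons, PySem.Set.add, PySem.Set.contains]
    by_cases hx : acc.contains x
    · rw [if_pos hx, ih acc, List.find?_cons_of_neg (by simp; intro _; simpa using hx)]
    · rw [if_neg hx, ih (acc ++ [x]), List.find?_append, Option.or_assoc]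
      congr 1
      by_cases hp : p x
      · have hr : List.find? (fun a => p a && !acc.contains a) (x :: xs) = some x :=
          List.find?_cons_of_pos (by simp [hp]; simpa using hx)
        rw [hr]
        simp [hp]
      · rw [List.find?_cons_of_neg (by simp [hp])]
        have hpred : (fun a => p a && !(acc ++ [x]).contains a) = (fun a => p a && !acc.contains a) := by
          funext a
          by_cases hax : a = x
          · subst hax; simp [hp]
          · simp [hax]
        rw [hpred]
        simp [hp]

lemma find?_ofList (p : Char → Bool) (xs : List Char) :
    List.find? p (PySem.Set.ofList xs) = List.find? p xs := by
  rw [PySem.Set.ofList_eq_foldl, find?_foldl_add]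
  simp

-- ===== VERDICT (by name: the statement is the Claim_ definition above) =====
theorem homework1_2_spec : Claim_equal_homework1_2 := by
  intro text _
  unfold Spec_homework1_2 homework1_2 homework1_2_alt
  dsimp only
  rw [dictA_eq_counter, PySem.Dict.items_counter, foldl_sel_eq, foldl_best_eq]
  set xs := text.toList with hxs
  set s := PySem.List.sorted xs (fun c => c) false with hsdef
  have hpair : s.Pairwise (· ≤ ·) := PySem.List.sorted_pairwise xs (fun c => c)
  have hperm : s.Perm xs := PySem.List.sorted_perm xs (fun c => c) false
  have hkeysperm : ((pvRuns s).map Prod.fst).Perm (PySem.Set.ofList xs) := by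
    apply (List.perm_ext_iff_of_nodup (pvRuns_keys_nodup hpair) (PySem.Set.nodup_ofList xs)).mpr
    intro a
    rw [pvRuns_keys_mem, PySem.Set.mem_ofList, hperm.mem_iff]
  have hvalsB : (pvRuns s).map Prod.snd = ((pvRuns s).map Prod.fst).map (fun k => (xs.count k : Int)) := by
    rw [List.map_map]
    apply List.map_congr_left
    intro kv hkv
    obtain ⟨h1, h2⟩ := pvRuns_mem hpair kv hkv
    simp [h2, Function.comp, hperm.count_eq]
  have hvalsA : ((PySem.Set.ofList xs).map (fun k => (k, (xs.count k : Int)))).map Prod.snd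
      = (PySem.Set.ofList xs).map (fun k => (xs.count k : Int)) := by
    rw [List.map_map]; rfl
  have hM : ((pvRuns s).map Prod.snd).foldl max 0
      = (((PySem.Set.ofList xs).map (fun k => (k, (xs.count k : Int)))).map Prod.snd).foldl max 0 := by
    rw [hvalsA, hvalsB]
    exact (hkeysperm.map _).foldl_eq 0
  rw [hM]
  set M := (((PySem.Set.ofList xs).map (fun k => (k, (xs.count k : Int)))).map Prod.snd).foldl max 0 with hMdef
  by_cases hM0 : M = 0
  · rw [if_pos hM0]
    have hnone : xs.find? (fun ch => (pvRuns s).contains (ch, M)) = none := by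
      apply List.find?_eq_none.mpr
      intro ch hch hcon
      have hmem : (ch, M) ∈ pvRuns s := by simpa using hcon
      obtain ⟨h1, h2⟩ := (pvRuns_pair_mem hpair ch M).mp hmem
      have hpos : 0 < s.count ch := List.count_pos_iff.mpr h1
      omega
    rw [hnone, hM0]
  · rw [if_neg hM0, List.find?_map, find?_ofList]
    have hcongr : xs.find? (fun ch => (pvRuns s).contains (ch, M))
        = xs.find? ((fun kv => kv.2 == M) ∘ (fun k => (k, (xs.count k : Int)))) := by
      apply find?_congr_mem
      intro a ha
      have has : a ∈ s := hperm.mem_iff.mpr ha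
      simp only [Function.comp]
      by_cases hc : (xs.count a : Int) = M
      · have : (a, M) ∈ pvRuns s := (pvRuns_pair_mem hpair a M).mpr ⟨has, by rw [hperm.count_eq, hc]⟩
        simp [this, hc]
      · have : (a, M) ∉ pvRuns s := by
          intro hmem
          obtain ⟨_, h2⟩ := (pvRuns_pair_mem hpair a M).mp hmem
          exact hc (by rw [← hperm.count_eq]; omega)
        simp [this, hc]
    rw [hcongr]
    cases hfind : xs.find? ((fun kv => kv.2 == M) ∘ (fun k => (k, (xs.count k : Int)))) with
    | none =>
      exfalso
      rcases PySem.List.foldl_max_mem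
        ((((PySem.Set.ofList xs).map (fun k => (k, (xs.count k : Int)))).map Prod.snd)) 0 with h1 | h1
      · exact hM0 h1
      · rw [hvalsA] at h1
        rcases List.mem_map.mp h1 with ⟨k, hk, hkeq⟩
        have hsome : (xs.find? ((fun kv => kv.2 == M) ∘ (fun k => (k, (xs.count k : Int))))).isSome := by
          rw [List.find?_isSome]
          exact ⟨k, (PySem.Set.mem_ofList xs k).mp hk, by simp only [Function.comp, beq_iff_eq]; rw [hkeq, hMdef, hvalsA]⟩
        rw [hfind] at hsome
        exact absurd hsome (by simp)
    | some ch => rfl
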